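-- pv_equiv track=rewrite | github.com/Null-Phnix/Blackreach | blackreach/stuck_detector.py | _normalize_url
-- ===== SOURCE A (Python) =====
-- def _normalize_url(url: str) -> str:
--     """Normalize URL for comparison."""
--     if not url:
--         return ""
--     # Remove fragments and trailing slashes
--     url = url.split('#')[0].rstrip('/')
--     # Remove common tracking parameters
--     for param in ['utm_', 'ref=', 'source=', 'fbclid=']:
--         if param in url:
--             url = url.split(param)[0].rstrip('&?')
--     return url.lower()
-- ===== SOURCE B (Python) =====
-- _TRACKING_TOKENS = ['utm_', 'ref=', 'source=', 'fbclid=']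
--
-- def _normalize_url(url: str) -> str:
--     """Normalize URL for comparison."""
--     if not url:
--         return ""
--     url = url.partition('#')[0].rstrip('/')
--     # Cut once at the earliest tracking token instead of truncating repeatedly.
--     hits = [i for i in (url.find(tok) for tok in _TRACKING_TOKENS) if i >= 0]
--     if hits:
--         url = url[:min(hits)].rstrip('&?')
--     return url.lower()
-- ===== Notes on version B (the rewrite author's own statement) =====
-- stated objective: alternative
-- what changed: Replaces the four sequential truncate-and-strip passes (each re-scanning the already-truncated string) by computing each tracking token's first index in the base string once, taking the minimum hit, and cutting plus stripping trailing separators exactly once; the fragment strip uses partition instead of split.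
import Mathlib
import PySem

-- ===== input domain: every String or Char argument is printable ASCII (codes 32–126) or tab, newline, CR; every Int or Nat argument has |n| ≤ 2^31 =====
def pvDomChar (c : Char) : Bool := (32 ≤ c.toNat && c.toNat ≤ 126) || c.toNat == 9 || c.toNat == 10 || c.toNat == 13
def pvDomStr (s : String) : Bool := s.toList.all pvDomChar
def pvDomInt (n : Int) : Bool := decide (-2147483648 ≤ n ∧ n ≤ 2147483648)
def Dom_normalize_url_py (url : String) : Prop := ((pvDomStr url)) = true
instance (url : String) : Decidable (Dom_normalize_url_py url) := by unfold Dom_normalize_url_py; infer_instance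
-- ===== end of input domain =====

-- B computes the single earliest tracking-token cut via min over find indices instead of A's
-- four sequential truncate-and-rstrip passes; same cost class, different decomposition ("alternative").

-- shared helper: exact port of Python str.rstrip(chars) (PySem has no chars-argument rstrip):
-- drop from the right while the char is in `chars`.
def pyRstripChars (cs chars : List Char) : List Char :=
  ((cs.reverse.dropWhile (fun c => chars.contains c)).reverse)

-- the module's tracking-token list ['utm_', 'ref=', 'source=', 'fbclid='] (shared constant)
def pvToks : List (List Char) :=
  [['u','t','m','_'], ['r','e','f','='], ['s','o','u','r','c','e','='], ['f','b','c','l','i','d','=']]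

-- ===== PORT A =====
-- one iteration of A's for-loop; url.split(param)[0] is (splitOn u t).headD [] —
-- split() never returns an empty list, so Python's [0] never raises.
def normA_step (u t : List Char) : List Char :=
  if PySem.Chars.isIn t u then pyRstripChars ((PySem.Chars.splitOn u t).headD []) ['&', '?'] else u

def normalize_url_py (url : String) : String :=
  if url = "" then "" else
    let u0 := pyRstripChars ((PySem.Chars.splitOn url.toList ['#']).headD []) ['/']
    let u := pvToks.foldl normA_step u0
    String.ofList (PySem.Chars.lower u)

-- ===== PORT B =====
-- port of url.partition('#')[0] for the one-char separator '#': the chars before the first '#'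
-- (exact: str.partition returns the full string as [0] when the separator is absent)
def pyPartitionFst (cs : List Char) (sep : Char) : List Char :=
  cs.takeWhile (fun c => !(c == sep))

def normalize_url_py_alt (url : String) : String :=
  if url = "" then "" else
    let u0 := pyRstripChars (pyPartitionFst url.toList '#') ['/']
    let hits := (pvToks.map (fun t => PySem.Chars.find u0 t)).filter (fun i => decide (0 ≤ i))
    let u := match PySem.List.min? hits (fun x => x) with
      | some m => pyRstripChars (PySem.Chars.slice u0 none (some m)) ['&', '?']
      | none => u0
    String.ofList (PySem.Chars.lower u)

-- ===== PRECONDITION & SPEC =====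
def Spec_normalize_url_py (url : String) (out : String) : Prop := out = normalize_url_py_alt url
instance (url : String) (out : String) : Decidable (Spec_normalize_url_py url out) := by unfold Spec_normalize_url_py; infer_instance

-- ===== CLAIM (what is proved, stated in full; the proofs are below) =====
def Claim_equal_normalize_url_py : Prop := ∀ (url : String), Dom_normalize_url_py url → Spec_normalize_url_py url (normalize_url_py url)

-- ===== LEMMAS AND PROOFS =====

-- the first piece of u.split(sep): chars of u up to the first occurrence of sep
def frontTok (sep : List Char) : List Char → List Char
  | [] => []
  | c :: r => if sep.isPrefixOf (c :: r) then [] else c :: frontTok sep r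

theorem rstrip_prefix (cs chars : List Char) : pyRstripChars cs chars <+: cs := by
  have h := List.dropWhile_suffix (l := cs.reverse) (fun c => chars.contains c)
  have := List.reverse_prefix.mpr h
  simpa [pyRstripChars] using this

theorem rstrip_length (cs chars : List Char) :
    (pyRstripChars cs chars).length
      = cs.length - (cs.reverse.takeWhile (fun c => chars.contains c)).length := by
  have h := List.takeWhile_append_dropWhile (p := fun c => chars.contains c) (l := cs.reverse)
  have hl := congrArg List.length h
  simp only [List.length_append, List.length_reverse] at hl
  simp only [pyRstripChars, List.length_reverse]
  omega

theorem rstrip_length_ge (cs chars t : List Char) (i : ℕ)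
    (hocc : t <+: cs.drop i) (hfree : ∀ c ∈ t, chars.contains c = false)
    (hne : t ≠ []) (hlen : i + t.length ≤ cs.length) :
    i + t.length ≤ (pyRstripChars cs chars).length := by
  rw [rstrip_length]
  set w := cs.reverse.takeWhile (fun c => chars.contains c) with hw
  have hwlen : w.length ≤ cs.length := by
    have h := (List.takeWhile_prefix (l := cs.reverse) (fun c => chars.contains c)).length_le
    rw [List.length_reverse] at h
    exact h
  have htpos : 0 < t.length := List.length_pos_iff.mpr hne
  by_contra hcon
  have hidx : cs.length - (i + t.length) < w.length := by omega
  have hgetw : w[cs.length - (i + t.length)]'hidx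
      = cs.reverse[cs.length - (i + t.length)]'(by simp; omega) := by
    exact (List.takeWhile_prefix _).getElem hidx
  have hrev : cs.reverse[cs.length - (i + t.length)]'(by simp; omega)
      = cs[i + (t.length - 1)]'(by omega) := by
    rw [List.getElem_reverse]
    congr 1
    omega
  have hcs : cs[i + (t.length - 1)]'(by omega) = t[t.length - 1]'(by omega) := by
    have h1 := hocc.getElem (i := t.length - 1) (by omega)
    rw [List.getElem_drop] at h1
    exact h1.symm
  have hmem : w[cs.length - (i + t.length)]'hidx ∈ w := List.getElem_mem _
  have hsat := List.mem_takeWhile_imp hmem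
  rw [hgetw, hrev, hcs] at hsat
  have hmem2 : t[t.length - 1]'(by omega) ∈ t := List.getElem_mem (by omega)
  have := hfree _ hmem2
  rw [this] at hsat
  exact absurd hsat (by simp)

theorem occ_infix (s t : List Char) (i : ℕ) (h : t <+: s.drop i) : t <:+: s :=
  h.isInfix.trans (List.drop_suffix i s).isInfix

theorem infix_occ (s t : List Char) (h : t <:+: s) : ∃ j, t <+: s.drop j :=
  (PySem.Chars.exists_prefix_drop_iff_isIn t s).mpr ((PySem.Chars.isIn_iff_infix t s).mpr h)

theorem find_eq_of (s t : List Char) (i : ℕ)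
    (hocc : t <+: s.drop i) (hmin : ∀ j < i, ¬ t <+: s.drop j) :
    PySem.Chars.find s t = i := by
  have hnn : 0 ≤ PySem.Chars.find s t :=
    (PySem.Chars.find_nonneg_iff s t).mpr (occ_infix s t i hocc)
  obtain ⟨hoccf, hminf⟩ := PySem.Chars.find_spec hnn
  rcases Nat.lt_trichotomy (PySem.Chars.find s t).toNat i with h | h | h
  · exact absurd hoccf (hmin _ h)
  · omega
  · exact absurd hocc (hminf _ h)

theorem find_prefix_eq (u s t : List Char) (hu : u <+: s)
    (h0 : 0 ≤ PySem.Chars.find s t)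
    (hfit : (PySem.Chars.find s t).toNat + t.length ≤ u.length) :
    PySem.Chars.find u t = PySem.Chars.find s t := by
  obtain ⟨hocc, hmin⟩ := PySem.Chars.find_spec h0
  set i := (PySem.Chars.find s t).toNat with hi
  have hu' : u = s.take u.length := List.prefix_iff_eq_take.mp hu
  have hocc' : t <+: u.drop i := by
    rw [hu', List.drop_take]
    exact List.prefix_take_iff.mpr ⟨hocc, by omega⟩
  have hmin' : ∀ j < i, ¬ t <+: u.drop j := fun j hj hpre =>
    hmin j hj (hpre.trans (hu.drop j))
  rw [find_eq_of u t i hocc' hmin']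
  omega

theorem find_prefix_neg (u s t : List Char) (hu : u <+: s)
    (hneg : PySem.Chars.find s t = -1) :
    PySem.Chars.find u t = -1 := by
  rw [PySem.Chars.find_eq_neg_one_iff] at hneg ⊢
  exact fun h => hneg (h.trans hu.isInfix)

theorem find_prefix_short (u s t : List Char) (hu : u <+: s)
    (h0 : 0 ≤ PySem.Chars.find s t) (hne : t ≠ [])
    (hshort : u.length ≤ (PySem.Chars.find s t).toNat) :
    PySem.Chars.find u t = -1 := by
  obtain ⟨hocc, hmin⟩ := PySem.Chars.find_spec h0
  rw [PySem.Chars.find_eq_neg_one_iff]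
  intro hinf
  obtain ⟨j, hj⟩ := infix_occ u t hinf
  have htpos : 0 < t.length := List.length_pos_iff.mpr hne
  have hlen : j + t.length ≤ u.length := by
    have h2 : t.length ≤ u.length - j := by simpa using hj.length_le
    omega
  exact hmin j (by omega) (hj.trans (hu.drop j))

theorem prefix_append_cases {α : Type} (l a b : List α) (h : l <+: a ++ b) :
    l <+: a ∨ a <+: l := by
  rcases Nat.lt_or_ge a.length l.length with hlt | hle
  · right
    have h1 := List.prefix_iff_eq_take.mp h
    have h3 : (a ++ b).take a.length <+: (a ++ b).take l.length :=
      List.take_prefix_take_left (Nat.le_of_lt hlt)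
    rw [h1]
    simpa using h3
  · left
    have h1 := List.prefix_iff_eq_take.mp h
    rw [List.take_append_of_le_length hle] at h1
    exact h1 ▸ List.take_prefix _ _

theorem pairTok : ∀ t ∈ pvToks, ∀ t' ∈ pvToks, ∀ d < t.length, 0 < d →
    ¬ t.drop d <+: t' ∧ ¬ t' <+: t.drop d := by decide

theorem no_straddle (s t t' : List Char) (ht : t ∈ pvToks) (ht' : t' ∈ pvToks)
    (i k : ℕ) (h1 : t <+: s.drop i) (h2 : t' <+: s.drop k) (hik : i < k) :
    i + t.length ≤ k := by
  by_contra hcon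
  have hd1 : 0 < k - i := by omega
  have hd2 : k - i < t.length := by omega
  obtain ⟨r, hr⟩ := h1
  have hdk : s.drop k = t.drop (k - i) ++ r := by
    have h3 : s.drop k = (s.drop i).drop (k - i) := by
      rw [List.drop_drop]
      congr 1
      omega
    rw [h3, ← hr, List.drop_append_of_le_length (by omega)]
  rw [hdk] at h2
  rcases prefix_append_cases t' (t.drop (k - i)) r h2 with hc | hc
  · exact (pairTok t ht t' ht' (k - i) hd2 hd1).2 hc
  · exact (pairTok t ht t' ht' (k - i) hd2 hd1).1 hc

theorem splitOn_go_spec (sep : List Char) (hsep : sep ≠ []) :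
    ∀ fuel (l cur : List Char) (acc : List (List Char)), l.length < fuel →
    ∃ rest, PySem.Chars.splitOn.go sep fuel l cur acc
      = acc.reverse ++ (cur.reverse ++ frontTok sep l) :: rest := by
  intro fuel
  induction fuel with
  | zero => intro l cur acc h; omega
  | succ fuel ih =>
    intro l cur acc h
    cases l with
    | nil =>
      refine ⟨[], ?_⟩
      rw [PySem.Chars.splitOn.go.eq_def]
      simp [frontTok]
    | cons c r =>
      rw [PySem.Chars.splitOn.go.eq_def]
      simp only []
      by_cases hpre : sep.isPrefixOf (c :: r) = true
      · rw [if_pos hpre]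
        have hlen : (List.drop sep.length (c :: r)).length < fuel := by
          have : 0 < sep.length := List.length_pos_iff.mpr hsep
          simp only [List.length_drop, List.length_cons]
          simp only [List.length_cons] at h
          omega
        obtain ⟨rest, hrest⟩ := ih (List.drop sep.length (c :: r)) [] (cur.reverse :: acc) hlen
        refine ⟨frontTok sep (List.drop sep.length (c :: r)) :: rest, ?_⟩
        rw [hrest]
        simp [frontTok, hpre]
      · rw [if_neg hpre]
        have hlen : r.length < fuel := by simp at h; omega
        obtain ⟨rest, hrest⟩ := ih r (c :: cur) acc hlen
        refine ⟨rest, ?_⟩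
        rw [hrest]
        simp [frontTok, hpre]

theorem splitOn_head (s sep : List Char) (hsep : sep ≠ []) :
    (PySem.Chars.splitOn s sep).headD [] = frontTok sep s := by
  obtain ⟨rest, hrest⟩ := splitOn_go_spec sep hsep (s.length + 1) s [] [] (by omega)
  unfold PySem.Chars.splitOn
  rw [hrest]
  simp

theorem frontTok_eq (sep : List Char) (hsep : sep ≠ []) :
    ∀ s, frontTok sep s = if 0 ≤ PySem.Chars.find s sep
      then s.take (PySem.Chars.find s sep).toNat else s := by
  intro s
  induction s with
  | nil =>
    have hneg : PySem.Chars.find [] sep = -1 := by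
      rw [PySem.Chars.find_eq_neg_one_iff]
      intro hinf
      exact hsep (List.eq_nil_of_infix_nil hinf)
    rw [hneg]
    simp [frontTok]
  | cons c r ih =>
    by_cases hpre : sep.isPrefixOf (c :: r) = true
    · have hfind : PySem.Chars.find (c :: r) sep = (0 : ℕ) := by
        apply find_eq_of
        · simpa using List.isPrefixOf_iff_prefix.mp hpre
        · omega
      rw [hfind]
      simp [frontTok, hpre]
    · by_cases h0 : 0 ≤ PySem.Chars.find r sep
      · obtain ⟨hocc, hmin⟩ := PySem.Chars.find_spec h0
        set j := (PySem.Chars.find r sep).toNat with hj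
        have hfind : PySem.Chars.find (c :: r) sep = (j + 1 : ℕ) := by
          apply find_eq_of
          · simpa using hocc
          · intro j' hj' hp
            cases j' with
            | zero =>
              simp only [List.drop_zero] at hp
              exact hpre (List.isPrefixOf_iff_prefix.mpr hp)
            | succ j'' =>
              simp only [List.drop_succ_cons] at hp
              exact hmin j'' (by omega) hp
        rw [hfind]
        simp only [frontTok, if_neg hpre, ih, if_pos h0]
        rw [if_pos (by positivity)]
        simp [List.take_succ_cons]
      · have hneg : PySem.Chars.find r sep = -1 := by
          have := PySem.Chars.neg_one_le_find r sep
          omega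
        have hfind : PySem.Chars.find (c :: r) sep = -1 := by
          rw [PySem.Chars.find_eq_neg_one_iff]
          intro hinf
          obtain ⟨j, hp⟩ := infix_occ _ _ hinf
          cases j with
          | zero =>
            simp only [List.drop_zero] at hp
            exact hpre (List.isPrefixOf_iff_prefix.mpr hp)
          | succ j'' =>
            simp only [List.drop_succ_cons] at hp
            rw [PySem.Chars.find_eq_neg_one_iff] at hneg
            exact hneg (occ_infix _ _ _ hp)
        rw [hfind]
        simp only [frontTok, if_neg hpre, ih, if_neg h0]
        rw [if_neg (by norm_num)]

-- B's state after processing the tokens `ts`: cut at the minimum hit, then rstrip('&?')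
def bstate (ts : List (List Char)) (s : List Char) : List Char :=
  match PySem.List.min? ((ts.map (fun t => PySem.Chars.find s t)).filter (fun i => decide (0 ≤ i))) (fun x => x) with
  | some m => pyRstripChars (s.take m.toNat) ['&', '?']
  | none => s

theorem tokFacts : ∀ t ∈ pvToks, t ≠ [] ∧ ∀ c ∈ t, (['&', '?'] : List Char).contains c = false := by
  intro t ht
  fin_cases ht <;> refine ⟨by simp, ?_⟩ <;> intro c hc <;> fin_cases hc <;> simp

theorem isIn_iff_find_nonneg (t u : List Char) :
    PySem.Chars.isIn t u = true ↔ 0 ≤ PySem.Chars.find u t := by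
  rw [PySem.Chars.isIn_iff_infix]
  exact (PySem.Chars.find_nonneg_iff u t).symm

theorem step_eq (u t : List Char) (ht : t ≠ []) :
    normA_step u t = if 0 ≤ PySem.Chars.find u t
      then pyRstripChars (u.take (PySem.Chars.find u t).toNat) ['&', '?'] else u := by
  unfold normA_step
  rw [splitOn_head u t ht, frontTok_eq t ht u]
  by_cases h : 0 ≤ PySem.Chars.find u t
  · have hin : PySem.Chars.isIn t u = true := (isIn_iff_find_nonneg t u).mpr h
    simp [hin, h]
  · have hin : PySem.Chars.isIn t u = false := by
      cases hb : PySem.Chars.isIn t u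
      · rfl
      · exact absurd ((isIn_iff_find_nonneg t u).mp hb) h
    simp [hin, h]

theorem bstate_step (s : List Char) (ps : List (List Char)) (t : List Char)
    (ht : t ∈ pvToks) (hps : ∀ p ∈ ps, p ∈ pvToks) :
    normA_step (bstate ps s) t = bstate (ps ++ [t]) s := by
  obtain ⟨htne, htfree⟩ := tokFacts t ht
  rw [step_eq _ t htne]
  set i := PySem.Chars.find s t with hi
  have hhits : ((ps ++ [t]).map (fun t => PySem.Chars.find s t)).filter (fun i => decide (0 ≤ i))
      = (ps.map (fun t => PySem.Chars.find s t)).filter (fun i => decide (0 ≤ i))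
        ++ (if 0 ≤ i then [i] else []) := by
    by_cases h : 0 ≤ i <;> simp [h, ← hi]
  cases hh : (ps.map (fun t => PySem.Chars.find s t)).filter (fun i => decide (0 ≤ i)) with
  | nil =>
    have hu : bstate ps s = s := by simp [bstate, hh, PySem.List.min?]
    rw [hu]
    by_cases h0 : 0 ≤ i
    · rw [if_pos (hi ▸ h0)]
      unfold bstate
      rw [hhits, hh]
      simp only [List.nil_append, if_pos h0, PySem.List.min?_id_cons, List.foldl_nil]
      rw [← hi]
    · rw [if_neg (hi ▸ h0)]
      unfold bstate
      rw [hhits, hh]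
      simp [h0, PySem.List.min?]
  | cons x hs =>
    set m := hs.foldl min x with hmdef
    have hu : bstate ps s = pyRstripChars (s.take m.toNat) ['&', '?'] := by
      simp [bstate, hh, PySem.List.min?_id_cons, ← hmdef]
    have hnn : ∀ y ∈ x :: hs, 0 ≤ y := by
      intro y hy
      have := List.of_mem_filter (hh ▸ hy)
      simpa using this
    have hmem : m ∈ x :: hs := by
      rcases PySem.List.foldl_min_mem hs x with h | h
      · rw [hmdef, h]; exact List.mem_cons_self ..
      · exact List.mem_cons_of_mem _ h
    have hm0 : 0 ≤ m := hnn m hmem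
    obtain ⟨t'', ht''ps, ht''find⟩ : ∃ t'' ∈ ps, PySem.Chars.find s t'' = m := by
      have hmem' : m ∈ (ps.map (fun t => PySem.Chars.find s t)).filter (fun i => decide (0 ≤ i)) :=
        hh ▸ hmem
      have := List.mem_of_mem_filter hmem'
      simpa using this
    have huprefix : bstate ps s <+: s := by
      rw [hu]
      exact (rstrip_prefix _ _).trans (List.take_prefix _ _)
    have hulen : (bstate ps s).length ≤ m.toNat := by
      have h1 : (bstate ps s).length ≤ (s.take m.toNat).length := by
        rw [hu]; exact (rstrip_prefix _ _).length_le
      have h2 : (s.take m.toNat).length ≤ m.toNat := by simp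
      omega
    by_cases h0 : 0 ≤ i
    · by_cases hmi : m ≤ i
      · -- the new token's first hit is at or past the current cut: both sides unchanged
        have hfneg : PySem.Chars.find (bstate ps s) t = -1 :=
          find_prefix_short _ s t huprefix (hi ▸ h0) htne (by rw [← hi]; omega)
        rw [if_neg (by rw [hfneg]; norm_num), hu]
        unfold bstate
        rw [hhits, hh, if_pos h0]
        have hfold : (hs ++ [i]).foldl min x = m := by
          rw [List.foldl_append]
          simp only [List.foldl_cons, List.foldl_nil, ← hmdef]
          exact min_eq_left hmi
        rw [show (x :: hs) ++ [i] = x :: (hs ++ [i]) from rfl, PySem.List.min?_id_cons, hfold]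
      · -- the new token hits strictly before the current cut: both sides cut at i
        have hil : i < m := by omega
        have h0' : 0 ≤ PySem.Chars.find s t := hi ▸ h0
        have hocc_t : t <+: s.drop (PySem.Chars.find s t).toNat := (PySem.Chars.find_spec h0').1
        rw [← hi] at hocc_t
        have h0'' : 0 ≤ PySem.Chars.find s t'' := by rw [ht''find]; exact hm0
        have hocc'' : t'' <+: s.drop m.toNat := by
          have h := (PySem.Chars.find_spec h0'').1
          rw [ht''find] at h
          exact h
        have hfit : i.toNat + t.length ≤ m.toNat :=
          no_straddle s t t'' ht (hps t'' ht''ps) i.toNat m.toNat hocc_t hocc'' (by omega)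
        have hslen : i.toNat + t.length ≤ s.length := by
          have h1 := hocc_t.length_le
          rw [List.length_drop] at h1
          have h2 := PySem.Chars.find_le_length s t
          rw [← hi] at h2
          omega
        have hocc_take : t <+: (s.take m.toNat).drop i.toNat := by
          rw [List.drop_take]
          exact List.prefix_take_iff.mpr ⟨hocc_t, by omega⟩
        have hlenu : i.toNat + t.length ≤ (bstate ps s).length := by
          rw [hu]
          apply rstrip_length_ge _ _ t i.toNat hocc_take htfree htne
          rw [List.length_take]
          omega
        have htpos : 0 < t.length := List.length_pos_iff.mpr htne
        have hfindu : PySem.Chars.find (bstate ps s) t = i := by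
          rw [find_prefix_eq _ s t huprefix h0' (by rw [← hi]; omega)]
        rw [if_pos (by rw [hfindu]; exact h0)]
        have htake : (bstate ps s).take i.toNat = s.take i.toNat := by
          have h1 := List.prefix_iff_eq_take.mp huprefix
          conv_lhs => rw [h1]
          rw [List.take_take]
          congr 1
          omega
        rw [hfindu, htake]
        unfold bstate
        rw [hhits, hh, if_pos h0]
        have hfold : (hs ++ [i]).foldl min x = i := by
          rw [List.foldl_append]
          simp only [List.foldl_cons, List.foldl_nil, ← hmdef]
          exact min_eq_right (le_of_lt hil)
        rw [show (x :: hs) ++ [i] = x :: (hs ++ [i]) from rfl, PySem.List.min?_id_cons, hfold]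
    · have hfneg : PySem.Chars.find (bstate ps s) t = -1 := by
        have hi' : PySem.Chars.find s t = -1 := by
          have := PySem.Chars.neg_one_le_find s t
          omega
        exact find_prefix_neg _ s t huprefix hi'
      rw [if_neg (by rw [hfneg]; norm_num), hu]
      unfold bstate
      rw [hhits, hh, if_neg h0]
      rw [List.append_nil, PySem.List.min?_id_cons, ← hmdef]


theorem bstate_fold (s : List Char) :
    ∀ (ts ps : List (List Char)), (∀ p ∈ ps, p ∈ pvToks) → (∀ p ∈ ts, p ∈ pvToks) →
    ts.foldl normA_step (bstate ps s) = bstate (ps ++ ts) s := by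
  intro ts
  induction ts with
  | nil => intro ps _ _; simp
  | cons t ts ih =>
    intro ps h1 h2
    have ht : t ∈ pvToks := h2 t (List.mem_cons_self ..)
    have hstep := bstate_step s ps t ht h1
    have h1' : ∀ p ∈ ps ++ [t], p ∈ pvToks := by
      intro p hp
      rcases List.mem_append.mp hp with h | h
      · exact h1 p h
      · simp only [List.mem_singleton] at h; exact h ▸ ht
    have h2' : ∀ p ∈ ts, p ∈ pvToks := fun p hp => h2 p (List.mem_cons_of_mem _ hp)
    have := ih (ps ++ [t]) h1' h2'
    simpa [hstep] using this

theorem core_eq (s : List Char) : pvToks.foldl normA_step s = bstate pvToks s := by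
  have h := bstate_fold s pvToks [] (by simp) (fun p hp => hp)
  have hnil : bstate [] s = s := by simp [bstate, PySem.List.min?]
  simpa [hnil] using h

theorem hits_nonneg (u0 : List Char) (x : ℤ)
    (hx : x ∈ (pvToks.map (fun t => PySem.Chars.find u0 t)).filter (fun i => decide (0 ≤ i))) :
    0 ≤ x := by
  have := List.of_mem_filter hx
  simpa using this

theorem bcore_eq (u0 : List Char) :
    (match PySem.List.min? ((pvToks.map (fun t => PySem.Chars.find u0 t)).filter (fun i => decide (0 ≤ i))) (fun x => x) with
     | some m => pyRstripChars (PySem.Chars.slice u0 none (some m)) ['&', '?']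
     | none => u0) = bstate pvToks u0 := by
  unfold bstate
  cases hh : (pvToks.map (fun t => PySem.Chars.find u0 t)).filter (fun i => decide (0 ≤ i)) with
  | nil => simp [PySem.List.min?]
  | cons x t =>
    rw [PySem.List.min?_id_cons]
    have hmem : t.foldl min x = x ∨ t.foldl min x ∈ t := PySem.List.foldl_min_mem t x
    have h0 : 0 ≤ t.foldl min x := by
      rcases hmem with h | h
      · rw [h]; exact hits_nonneg u0 x (hh ▸ List.mem_cons_self ..)
      · exact hits_nonneg u0 _ (hh ▸ List.mem_cons_of_mem _ h)
    simp only [PySem.Chars.slice_eq_listSlice, PySem.List.slice_to _ h0]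

theorem partition_head_eq (s : List Char) :
    pyPartitionFst s '#' = (PySem.Chars.splitOn s ['#']).headD [] := by
  rw [splitOn_head s ['#'] (by simp)]
  induction s with
  | nil => rfl
  | cons c r ih =>
    by_cases h : c = '#'
    · simp [pyPartitionFst, frontTok, h, List.isPrefixOf]
    · simp only [pyPartitionFst, List.takeWhile_cons, frontTok] at ih ⊢
      rw [if_pos (by simp [h]), if_neg (by simp [List.isPrefixOf]; exact fun hh => h hh.symm)]
      rw [ih]

-- ===== VERDICT (by name: the statement is the Claim_ definition above) =====
theorem normalize_url_py_spec : Claim_equal_normalize_url_py := by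
  intro url _
  unfold Spec_normalize_url_py normalize_url_py normalize_url_py_alt
  by_cases h : url = ""
  · simp [h]
  · simp only [h, if_false]
    rw [partition_head_eq, core_eq, bcore_eq]
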